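-- pv_equiv track=rewrite | github.com/CommanderCode/Daily-Problems | Daily-366-word funnel.py | funnel
-- ===== SOURCE A (Python) =====
-- def funnel(a,b):
--     for i in range(len(a)):
--         a_list=list(a)
--         del a_list[i]
--         a_new="".join(a_list)
--         if a_new==b:
--             return True
--             break
--     return False
-- ===== SOURCE B (Python) =====
-- def funnel(a, b):
--     # linear: deleting one char of a yields b iff len(a)==len(b)+1 and
--     # after the common prefix, skipping one char of a aligns the suffixes
--     if len(a) != len(b) + 1:
--         return False
--     i = 0
--     while i < len(b) and a[i] == b[i]:
--         i += 1
--     return a[i+1:] == b[i:]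
-- ===== Notes on version B (the rewrite author's own statement) =====
-- stated objective: faster
-- what changed: Replaces the try-every-deletion loop (rebuilding and comparing a full string per index) with a single linear scan: check len(a)==len(b)+1, advance past the common prefix, then compare the suffixes with one char of a skipped.
import Mathlib
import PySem

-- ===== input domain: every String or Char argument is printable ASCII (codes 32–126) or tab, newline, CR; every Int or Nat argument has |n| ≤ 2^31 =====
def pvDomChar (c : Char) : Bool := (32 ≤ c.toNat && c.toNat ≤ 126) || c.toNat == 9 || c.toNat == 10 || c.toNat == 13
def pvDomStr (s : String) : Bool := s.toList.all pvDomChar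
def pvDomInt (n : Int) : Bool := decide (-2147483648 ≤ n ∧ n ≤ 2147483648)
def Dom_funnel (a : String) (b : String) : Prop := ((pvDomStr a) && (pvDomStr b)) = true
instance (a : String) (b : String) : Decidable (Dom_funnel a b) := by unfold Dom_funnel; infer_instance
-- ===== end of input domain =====

-- B replaces A's try-every-deletion loop by one linear prefix/suffix scan (asymptotically faster).

-- ===== PORT A =====
-- the for-loop with early `return True`: try each index i, delete it, compare to b
-- ("".join(list(a) with a[i] deleted) == b is exactly char-list equality)
def funnelLoop (al bl : List Char) : List Nat → Bool
  | [] => false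
  | i :: rest => if al.eraseIdx i == bl then true else funnelLoop al bl rest

def funnel (a : String) (b : String) : Bool :=
  funnelLoop a.toList b.toList (List.range a.toList.length)

-- ===== PORT B =====
-- while loop advancing past the common prefix, then `a[i+1:] == b[i:]`
def skipOne : List Char → List Char → Bool
  | _ :: xs, [] => xs.isEmpty
  | x :: xs, y :: ys => if x == y then skipOne xs ys else xs == y :: ys
  | [], _ => false

def funnel_alt (a : String) (b : String) : Bool :=
  if a.toList.length ≠ b.toList.length + 1 then false
  else skipOne a.toList b.toList

-- ===== PRECONDITION & SPEC =====
def Spec_funnel (a : String) (b : String) (out : Bool) : Prop := out = funnel_alt a b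
instance (a : String) (b : String) (out : Bool) : Decidable (Spec_funnel a b out) := by unfold Spec_funnel; infer_instance

-- ===== CLAIM (what is proved, stated in full; the proofs are below) =====
def Claim_equal_funnel : Prop := ∀ (a : String) (b : String), Dom_funnel a b → Spec_funnel a b (funnel a b)

-- ===== LEMMAS AND PROOFS =====

theorem funnelLoop_eq_any (al bl : List Char) (l : List Nat) :
    funnelLoop al bl l = l.any (fun i => al.eraseIdx i == bl) := by
  induction l with
  | nil => rfl
  | cons i r ih =>
    simp only [funnelLoop, ih, List.any_cons]
    cases h : al.eraseIdx i == bl <;> simp_all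

theorem skipOne_cons_self (c : Char) (l : List Char) : skipOne (c :: l) l = true := by
  induction l generalizing c with
  | nil => rfl
  | cons d ds ih => simp [skipOne]; exact Or.inr (ih d)

theorem main_lemma (al bl : List Char) :
    (List.range al.length).any (fun i => al.eraseIdx i == bl) =
      (if al.length = bl.length + 1 then skipOne al bl else false) := by
  induction al generalizing bl with
  | nil => simp
  | cons x xs ih =>
    rw [Bool.eq_iff_iff]
    simp only [List.any_eq_true, List.mem_range]
    constructor
    · rintro ⟨i, hi, he⟩
      cases i with
      | zero =>
        simp only [List.eraseIdx, beq_iff_eq] at he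
        subst he
        cases xs with
        | nil => simp [skipOne]
        | cons y ys =>
          simp [skipOne, skipOne_cons_self]
      | succ j =>
        cases bl with
        | nil => simp_all [List.eraseIdx]
        | cons y ys =>
          simp only [List.eraseIdx, beq_iff_eq, List.cons.injEq] at he
          obtain ⟨hxy, hys⟩ := he
          have hj : j < xs.length := by simpa using hi
          have := (Bool.eq_iff_iff.mp (ih ys)).mp
          simp only [List.any_eq_true, List.mem_range] at this
          have h2 := this ⟨j, hj, by simp [hys]⟩
          by_cases hlen : xs.length = ys.length + 1
          · rw [if_pos hlen] at h2
            rw [if_pos (by simp [hlen])]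
            simp [skipOne, hxy, h2]
          · rw [if_neg hlen] at h2
            exact absurd h2 (by simp)
    · intro h
      split_ifs at h with hlen
      · cases bl with
        | nil =>
          have hx : xs = [] := by
            cases xs with
            | nil => rfl
            | cons => simp at hlen
          exact ⟨0, by simp, by simp [List.eraseIdx, hx]⟩
        | cons y ys =>
          simp only [skipOne] at h
          by_cases hxy : x = y
          · rw [if_pos (by simp [hxy])] at h
            have hlen' : xs.length = ys.length + 1 := by simpa using hlen
            have := (Bool.eq_iff_iff.mp (ih ys)).mpr
            simp only [List.any_eq_true, List.mem_range] at this
            obtain ⟨j, hj, he⟩ := this (by simp [hlen', h])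
            exact ⟨j + 1, by simpa using hj, by simp [List.eraseIdx, hxy, he]⟩
          · rw [if_neg (by simp [hxy])] at h
            have : xs = y :: ys := by simpa using h
            exact ⟨0, by simp, by simp [List.eraseIdx, this]⟩

-- ===== VERDICT (by name: the statement is the Claim_ definition above) =====
theorem funnel_spec : Claim_equal_funnel := by
  intro a b _
  unfold Spec_funnel funnel funnel_alt
  rw [funnelLoop_eq_any, main_lemma]
  split_ifs with h <;> simp_all
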